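-- pv_equiv track=rewrite | github.com/CandeGodoy/prog | programacion/resoluciones/FINAL - matriz repetidos.py | recursiva
-- ===== SOURCE A (Python) =====
-- def recursiva(matrix):
--     conjunto = set()
--     repetidos = set()
--
--     for filaa in matrix:
--         for elemento in filaa:
--             if elemento in conjunto:
--                 repetidos.add(elemento)
--             else:
--                 conjunto.add(elemento)
--
--     return len(repetidos)
-- ===== SOURCE B (Python) =====
-- def recursiva(matrix):
--     flat = sorted(e for row in matrix for e in row)
--     dup = 0
--     i = 0
--     n = len(flat)
--     while i < n:
--         j = i + 1
--         while j < n and flat[j] == flat[i]: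
--             j += 1
--         if j - i > 1:
--             dup += 1
--         i = j
--     return dup
-- ===== Notes on version B (the rewrite author's own statement) =====
-- stated objective: alternative
-- what changed: Replaces A's single-pass seen/repeated two-set membership scan with sort-the-flattened-elements-then-scan-maximal-runs, counting runs of length greater than one.
import Mathlib
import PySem

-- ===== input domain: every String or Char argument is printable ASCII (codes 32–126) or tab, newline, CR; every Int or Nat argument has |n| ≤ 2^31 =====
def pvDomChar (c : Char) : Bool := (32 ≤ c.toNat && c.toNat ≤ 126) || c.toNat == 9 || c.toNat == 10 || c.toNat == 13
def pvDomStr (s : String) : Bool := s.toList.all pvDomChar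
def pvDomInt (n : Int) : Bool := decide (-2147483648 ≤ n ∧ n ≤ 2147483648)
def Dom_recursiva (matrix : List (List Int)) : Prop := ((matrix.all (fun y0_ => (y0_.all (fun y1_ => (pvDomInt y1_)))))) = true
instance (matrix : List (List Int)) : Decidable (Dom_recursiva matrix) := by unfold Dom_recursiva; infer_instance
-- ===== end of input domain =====

-- B replaces A's single-pass seen/repeated two-set membership scan by sorting the
-- flattened elements and scanning maximal runs, counting runs of length > 1
-- (objective: alternative; same return value).

-- ===== PORT A =====
def recursiva (matrix : List (List Int)) : Int :=
  let st := matrix.foldl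
    (fun st filaa => filaa.foldl
      (fun st elemento =>
        if PySem.Set.contains st.1 elemento then
          (st.1, PySem.Set.add st.2 elemento)
        else
          (PySem.Set.add st.1 elemento, st.2)) st)
    ((PySem.Set.empty : PySem.Set Int), (PySem.Set.empty : PySem.Set Int))
  PySem.Set.len st.2

-- ===== PORT B =====
-- B's outer while-loop walks the sorted list run by run: the inner
-- 'while j < n and flat[j] == flat[i]' advance is the takeWhile/dropWhile split
-- of the suffix starting at i; 'j - i > 1' is 'the run behind the head is nonempty'.
def pvScanRuns : List Int → Int
  | [] => 0
  | x :: t =>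
    let run := t.takeWhile (fun y => y == x)
    let rest := t.dropWhile (fun y => y == x)
    (if 0 < run.length then 1 else 0) + pvScanRuns rest
termination_by xs => xs.length
decreasing_by
  simpa using Nat.lt_succ_of_le (t.length_dropWhile_le (fun y => y == x))

def recursiva_alt (matrix : List (List Int)) : Int :=
  let flat := PySem.List.sorted (matrix.flatMap id) (fun x => x) false
  pvScanRuns flat

-- ===== PRECONDITION & SPEC =====
def Spec_recursiva (matrix : List (List Int)) (out : Int) : Prop := out = recursiva_alt matrix
instance (matrix : List (List Int)) (out : Int) : Decidable (Spec_recursiva matrix out) := by unfold Spec_recursiva; infer_instance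

-- ===== CLAIM (what is proved, stated in full; the proofs are below) =====
def Claim_equal_recursiva : Prop := ∀ (matrix : List (List Int)), Dom_recursiva matrix → Spec_recursiva matrix (recursiva matrix)

-- ===== LEMMAS AND PROOFS =====

theorem pv_count_cons (e x : Int) (t : List Int) :
    (e :: t).count x = t.count x + if e = x then 1 else 0 := by
  simp [List.count_cons]

-- A nested 'for row in matrix: for e in row:' fold equals a fold over the flattened list.
theorem pv_foldl_nested {σ : Type} (f : σ → Int → σ) :
    ∀ (matrix : List (List Int)) (init : σ),
      matrix.foldl (fun s row => row.foldl f s) init = (matrix.flatMap id).foldl f init := by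
  intro matrix
  induction matrix with
  | nil => intro init; rfl
  | cons row rest ih =>
    intro init
    simp [List.flatMap_cons, List.foldl_append, ih]

-- Invariant of A's loop over the flattened element list: 'repetidos' stays duplicate-free
-- and holds exactly the elements already in 'conjunto' when revisited / seen at least twice.
theorem pv_A_inv (xs : List Int) :
    ∀ (c r : PySem.Set Int), c.Nodup → r.Nodup →
      (xs.foldl (fun st elemento =>
          if PySem.Set.contains st.1 elemento then
            (st.1, PySem.Set.add st.2 elemento)
          else
            (PySem.Set.add st.1 elemento, st.2)) (c, r)).2.Nodup ∧
      (∀ x, x ∈ (xs.foldl (fun st elemento =>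
          if PySem.Set.contains st.1 elemento then
            (st.1, PySem.Set.add st.2 elemento)
          else
            (PySem.Set.add st.1 elemento, st.2)) (c, r)).2 ↔
        x ∈ r ∨ (x ∈ c ∧ x ∈ xs) ∨ 2 ≤ xs.count x) := by
  induction xs with
  | nil =>
    intro c r _ hr
    refine ⟨hr, fun x => ?_⟩
    simp
  | cons e t ih =>
    intro c r hc hr
    by_cases he : e ∈ c
    · have hcont : PySem.Set.contains c e = true := (PySem.Set.contains_iff c e).mpr he
      rw [List.foldl_cons, if_pos (by simpa using hcont)]
      obtain ⟨hnd, hmem⟩ := ih c (PySem.Set.add r e) hc (PySem.Set.nodup_add r e hr)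
      refine ⟨hnd, fun x => ?_⟩
      rw [hmem x, PySem.Set.mem_add, List.mem_cons, pv_count_cons e x t]
      have hle := (List.sublist_cons_self e t).count_le x
      rw [pv_count_cons e x t] at hle
      by_cases hxe : e = x
      · subst hxe
        have hite : (if e = e then (1:Nat) else 0) = 1 := by simp
        rw [hite]
        rw [hite] at hle
        constructor
        · rintro ((hx | _) | ⟨hxc, hxt⟩ | hcnt)
          · exact Or.inl hx
          · exact Or.inr (Or.inl ⟨he, Or.inl rfl⟩)
          · exact Or.inr (Or.inl ⟨hxc, Or.inr hxt⟩)
          · exact Or.inr (Or.inr (by omega))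
        · rintro (hx | ⟨hxc, _⟩ | hcnt)
          · exact Or.inl (Or.inl hx)
          · exact Or.inl (Or.inr rfl)
          · exact Or.inl (Or.inr rfl)
      · simp only [if_neg hxe, add_zero]
        constructor
        · rintro ((hx | rfl) | ⟨hxc, hxt⟩ | hcnt)
          · exact Or.inl hx
          · exact absurd rfl hxe
          · exact Or.inr (Or.inl ⟨hxc, Or.inr hxt⟩)
          · exact Or.inr (Or.inr hcnt)
        · rintro (hx | ⟨hxc, hxet⟩ | hcnt)
          · exact Or.inl (Or.inl hx)
          · rcases hxet with rfl | hxt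
            · exact absurd rfl hxe
            · exact Or.inr (Or.inl ⟨hxc, hxt⟩)
          · exact Or.inr (Or.inr hcnt)
    · have hcont : PySem.Set.contains c e = false := by
        by_contra h
        exact he ((PySem.Set.contains_iff c e).mp (by simpa using h))
      rw [List.foldl_cons, if_neg (by simpa using he)]
      obtain ⟨hnd, hmem⟩ := ih (PySem.Set.add c e) r (PySem.Set.nodup_add c e hc) hr
      refine ⟨hnd, fun x => ?_⟩
      rw [hmem x, List.mem_cons, pv_count_cons e x t]
      by_cases hxe : e = x
      · subst hxe
        have het : 1 ≤ t.count e ↔ e ∈ t := by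
          constructor
          · intro h; exact List.count_pos_iff.mp (by omega)
          · intro h; have := List.count_pos_iff.mpr h; omega
        have hite : (if e = e then (1:Nat) else 0) = 1 := by simp
        rw [hite]
        constructor
        · rintro (hx | ⟨_, hxt⟩ | hcnt)
          · exact Or.inl hx
          · have := het.mpr hxt
            exact Or.inr (Or.inr (by omega))
          · exact Or.inr (Or.inr (by omega))
        · rintro (hx | ⟨hxc, _⟩ | hcnt)
          · exact Or.inl hx
          · exact absurd hxc he
          · have hxt : e ∈ t := het.mp (by omega)
            exact Or.inr (Or.inl ⟨(PySem.Set.mem_add c e e).mpr (Or.inr rfl), hxt⟩)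
      · simp only [if_neg hxe, add_zero]
        constructor
        · rintro (hx | ⟨hxc, hxt⟩ | hcnt)
          · exact Or.inl hx
          · rcases (PySem.Set.mem_add c e x).mp hxc with hxc' | rfl
            · exact Or.inr (Or.inl ⟨hxc', Or.inr hxt⟩)
            · exact absurd rfl hxe
          · exact Or.inr (Or.inr hcnt)
        · rintro (hx | ⟨hxc, hxet⟩ | hcnt)
          · exact Or.inl hx
          · rcases hxet with rfl | hxt
            · exact absurd rfl hxe
            · exact Or.inr (Or.inl ⟨(PySem.Set.mem_add c e x).mpr (Or.inl hxc), hxt⟩)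
          · exact Or.inr (Or.inr hcnt)

-- On a (≤)-sorted list, the run scan counts exactly the members of any duplicate-free
-- list r holding precisely the values with count ≥ 2.
theorem pv_scanRuns_sorted (n : Nat) :
    ∀ (s : List Int), s.length ≤ n → s.Pairwise (· ≤ ·) →
      ∀ (r : List Int), r.Nodup → (∀ x, x ∈ r ↔ 2 ≤ s.count x) →
        pvScanRuns s = (r.length : Int) := by
  induction n with
  | zero =>
    intro s hs _ r _ hr
    have : s = [] := List.eq_nil_of_length_eq_zero (Nat.le_zero.mp hs)
    subst this
    cases r with
    | nil => simp [pvScanRuns]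
    | cons y ys =>
      have := (hr y).mp (List.mem_cons_self)
      simp at this
  | succ n ih =>
    intro s hs hsort r hnd hr
    cases s with
    | nil =>
      cases r with
      | nil => simp [pvScanRuns]
      | cons y ys =>
        have := (hr y).mp (List.mem_cons_self)
        simp at this
    | cons x t =>
      have hrun : ∀ y ∈ t.takeWhile (fun y => y == x), y = x := by
        intro y hy
        simpa using List.mem_takeWhile_imp hy
      have hsplit : t = t.takeWhile (fun y => y == x) ++ t.dropWhile (fun y => y == x) :=
        (List.takeWhile_append_dropWhile (p := fun y => y == x) (l := t)).symm
      have hrest_sub : (t.dropWhile (fun y => y == x)).Sublist (x :: t) :=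
        ((t.dropWhile_sublist (p := fun y => y == x)).trans (List.sublist_cons_self x t))
      have hxnotin : x ∉ t.dropWhile (fun y => y == x) := by
        cases hdw : t.dropWhile (fun y => y == x) with
        | nil => simp
        | cons h hs' =>
          have hhx : ¬ (h == x) = true := by
            have := List.head?_dropWhile_not (p := fun y => y == x) (l := t)
            rw [hdw] at this
            simpa using this
          have hhx' : h ≠ x := by simpa using hhx
          -- every element of the rest is ≥ its head h, and h > x since sorted and h ≠ x
          have hxle : ∀ y ∈ t, x ≤ y := by
            intro y hy
            exact (List.pairwise_cons.mp hsort).1 y hy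
          have hhmem : h ∈ t := by
            have hmem0 : h ∈ t.dropWhile (fun y => y == x) := by rw [hdw]; exact List.mem_cons_self
            exact (t.dropWhile_sublist (p := fun y => y == x)).mem hmem0
          have hxh : x < h := lt_of_le_of_ne (hxle h hhmem) (Ne.symm hhx')
          have hrestsorted : (h :: hs').Pairwise (· ≤ ·) := by
            have := List.Pairwise.sublist hrest_sub hsort
            rwa [hdw] at this
          intro hmem
          rcases List.mem_cons.mp hmem with rfl | hmem'
          · exact hhx' rfl
          · have := (List.pairwise_cons.mp hrestsorted).1 x hmem'
            omega
      have hcount_rest_x : (t.dropWhile (fun y => y == x)).count x = 0 :=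
        List.count_eq_zero.mpr hxnotin
      have hcount_x : (x :: t).count x
          = (t.takeWhile (fun y => y == x)).length + 1 := by
        rw [pv_count_cons, if_pos rfl]
        conv_lhs => rw [hsplit]
        rw [List.count_append, hcount_rest_x]
        have : (t.takeWhile (fun y => y == x)).count x
            = (t.takeWhile (fun y => y == x)).length := by
          apply List.count_eq_length.mpr
          intro y hy
          exact (hrun y hy).symm
        omega
      have hcount_ne : ∀ y, y ≠ x →
          (x :: t).count y = (t.dropWhile (fun y => y == x)).count y := by
        intro y hyx
        rw [pv_count_cons, if_neg (fun h => hyx h.symm)]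
        conv_lhs => rw [hsplit]
        rw [List.count_append]
        have : (t.takeWhile (fun y => y == x)).count y = 0 := by
          apply List.count_eq_zero.mpr
          intro hy
          exact hyx (hrun y hy)
        omega
      have hrest_len : (t.dropWhile (fun y => y == x)).length ≤ n := by
        have h1 := t.length_dropWhile_le (fun y => y == x)
        have h2 : (x :: t).length ≤ n + 1 := hs
        simp at h2
        omega
      have hrest_sorted : (t.dropWhile (fun y => y == x)).Pairwise (· ≤ ·) :=
        List.Pairwise.sublist hrest_sub hsort
      rw [pvScanRuns]
      by_cases hdup : 0 < (t.takeWhile (fun y => y == x)).length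
      · -- x is a duplicate: it is in r; recurse with r.erase x
        have hxr : x ∈ r := (hr x).mpr (by rw [hcount_x]; omega)
        have ih' := ih (t.dropWhile (fun y => y == x)) hrest_len hrest_sorted
          (r.erase x) (hnd.erase x) ?_
        · rw [if_pos hdup, ih']
          have := r.length_erase_of_mem hxr
          have hpos : 0 < r.length := List.length_pos_of_mem hxr
          rw [this]
          omega
        · intro y
          rw [List.Nodup.mem_erase_iff hnd, hr y]
          constructor
          · rintro ⟨hyx, hcnt⟩
            rwa [hcount_ne y hyx] at hcnt
          · intro hcnt
            have hyx : y ≠ x := by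
              rintro rfl
              rw [hcount_rest_x] at hcnt
              omega
            exact ⟨hyx, by rwa [hcount_ne y hyx]⟩
      · -- x occurs once: not in r; the run is empty so rest = t
        have hxnr : x ∉ r := by
          intro hxr
          have := (hr x).mp hxr
          rw [hcount_x] at this
          omega
        have ih' := ih (t.dropWhile (fun y => y == x)) hrest_len hrest_sorted r hnd ?_
        · rw [if_neg hdup, ih']; omega
        · intro y
          rw [hr y]
          by_cases hyx : y = x
          · subst hyx
            rw [hcount_x, hcount_rest_x]
            omega
          · rw [hcount_ne y hyx]

theorem recursiva_spec_aux : ∀ (matrix : List (List Int)), recursiva matrix = recursiva_alt matrix := by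
  intro matrix
  simp only [recursiva, recursiva_alt]
  rw [pv_foldl_nested]
  set flat := matrix.flatMap id with hflat
  obtain ⟨hnd, hmem⟩ := pv_A_inv flat PySem.Set.empty PySem.Set.empty List.nodup_nil List.nodup_nil
  set R := (flat.foldl (fun st elemento =>
      if PySem.Set.contains st.1 elemento then
        (st.1, PySem.Set.add st.2 elemento)
      else
        (PySem.Set.add st.1 elemento, st.2)) (PySem.Set.empty, PySem.Set.empty)).2 with hR
  have hperm : (PySem.List.sorted flat (fun x => x) false).Perm flat :=
    PySem.List.sorted_perm flat (fun x => x) false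
  have hkey : ∀ x, x ∈ R ↔ 2 ≤ (PySem.List.sorted flat (fun x => x) false).count x := by
    intro x
    rw [hmem x, hperm.count_eq]
    constructor
    · rintro (hx | ⟨hx, _⟩ | hcnt)
      · exact absurd hx List.not_mem_nil
      · exact absurd hx List.not_mem_nil
      · exact hcnt
    · intro hcnt
      exact Or.inr (Or.inr hcnt)
  have := pv_scanRuns_sorted (PySem.List.sorted flat (fun x => x) false).length
    (PySem.List.sorted flat (fun x => x) false) le_rfl
    (by simpa using PySem.List.sorted_pairwise flat (fun x => x)) R hnd hkey
  rw [this]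
  simp [PySem.Set.len]

-- ===== VERDICT (by name: the statement is the Claim_ definition above) =====
theorem recursiva_spec : Claim_equal_recursiva := by
  intro matrix _
  unfold Spec_recursiva
  exact recursiva_spec_aux matrix
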